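-- pv_equiv track=rewrite | github.com/darkolol9/personal_algorithm_tools | 52.py | compare_digit_counts
-- ===== SOURCE A (Python) =====
-- def compare_digit_counts(a, b):
--     digs_a = {x: 0 for x in range(10)}
--     digs_b = {x: 0 for x in range(10)}
--
--
--     for x in str(a):
--         digs_a[int(x)] += 1
--
--     for x in str(b):
--         digs_b[int(x)] += 1
--
--
--     for key in digs_a:
--         if digs_a[key] != digs_b[key]:
--             return False
--
--     return True
-- ===== SOURCE B (Python) =====
-- def compare_digit_counts(a, b):
--     return sorted(map(int, str(a))) == sorted(map(int, str(b)))
-- ===== Notes on version B (the rewrite author's own statement) =====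
-- stated objective: idiomatic
-- what changed: Replaced the two 10-entry frequency dictionaries and the key-by-key comparison loop with a single sort-based multiset comparison of the digit lists (sorted(map(int, str(a))) == sorted(map(int, str(b)))), keeping int() per character so non-digit characters (e.g. the '-' of negatives) raise ValueError exactly as in A.
import Mathlib
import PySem

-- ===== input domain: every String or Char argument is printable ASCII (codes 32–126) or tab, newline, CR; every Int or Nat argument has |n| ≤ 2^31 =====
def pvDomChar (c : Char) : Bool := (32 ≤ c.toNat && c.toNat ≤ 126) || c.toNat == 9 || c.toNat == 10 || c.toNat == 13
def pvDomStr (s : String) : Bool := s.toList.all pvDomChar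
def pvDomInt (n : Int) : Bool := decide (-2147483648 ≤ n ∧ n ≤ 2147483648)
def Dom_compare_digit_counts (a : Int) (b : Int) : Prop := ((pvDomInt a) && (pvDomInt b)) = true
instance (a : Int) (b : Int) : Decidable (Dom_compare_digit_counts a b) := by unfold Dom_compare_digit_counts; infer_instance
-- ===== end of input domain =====

-- B replaces A's two 10-entry frequency dicts and comparison loop by one sorted-digit-list comparison (idiomatic; same cost class).

-- int(x) for a single character x (exact under Pre_, where every character is a digit; the 0 default is never reached there)
def pyIntChar (c : Char) : Int := (PySem.Int.ofChars? [c]).getD 0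

-- ===== PORT A =====
def compare_digit_counts (a : Int) (b : Int) : Bool :=
  let digsA0 : PySem.Dict Int Int := (PySem.List.pyRange 0 10 1).foldl (fun d x => d.insert x 0) PySem.Dict.empty
  let digsB0 : PySem.Dict Int Int := (PySem.List.pyRange 0 10 1).foldl (fun d x => d.insert x 0) PySem.Dict.empty
  let digsA := (PySem.Int.toChars a).foldl (fun d x => d.modify (pyIntChar x) 0 (· + 1)) digsA0
  let digsB := (PySem.Int.toChars b).foldl (fun d x => d.modify (pyIntChar x) 0 (· + 1)) digsB0
  -- 'for key in digs_a: if digs_a[key] != digs_b[key]: return False / return True' (keys are always present: getD's default is never used)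
  digsA.keys.all (fun key => digsA.getD key 0 == digsB.getD key 0)

-- ===== PORT B =====
def compare_digit_counts_alt (a : Int) (b : Int) : Bool :=
  PySem.List.sorted ((PySem.Int.toChars a).map pyIntChar) (fun x => x) false
    == PySem.List.sorted ((PySem.Int.toChars b).map pyIntChar) (fun x => x) false

-- ===== PRECONDITION & SPEC =====
-- Pre_ excludes negative a or b: there str(·) contains '-', and int('-') raises ValueError in both A and B.
def Pre_compare_digit_counts (a : Int) (b : Int) : Prop := 0 ≤ a ∧ 0 ≤ b
instance (a : Int) (b : Int) : Decidable (Pre_compare_digit_counts a b) := by unfold Pre_compare_digit_counts; infer_instance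
def pvWitness_compare_digit_counts : Int × Int := (120, 210)

def Spec_compare_digit_counts (a : Int) (b : Int) (out : Bool) : Prop := out = compare_digit_counts_alt a b
instance (a : Int) (b : Int) (out : Bool) : Decidable (Spec_compare_digit_counts a b out) := by unfold Spec_compare_digit_counts; infer_instance

-- ===== CLAIM (what is proved, stated in full; the proofs are below) =====
def Claim_equal_compare_digit_counts : Prop := ∀ (a : Int) (b : Int), Dom_compare_digit_counts a b → Pre_compare_digit_counts a b → Spec_compare_digit_counts a b (compare_digit_counts a b)

-- ===== LEMMAS AND PROOFS =====

-- every character of Nat.toDigitsCore is from the accumulator or a digit character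
lemma mem_toDigitsCore (f : Nat) : ∀ (n : Nat) (l : List Char) (c : Char),
    c ∈ Nat.toDigitsCore 10 f n l → c ∈ l ∨ ∃ m, m < 10 ∧ c = Nat.digitChar m := by
  induction f with
  | zero => intro n l c h; exact Or.inl h
  | succ f ih =>
    intro n l c h
    simp only [Nat.toDigitsCore] at h
    by_cases hn : n / 10 = 0
    · rw [if_pos hn] at h
      rcases List.mem_cons.mp h with h | h
      · exact Or.inr ⟨n % 10, Nat.mod_lt _ (by norm_num), h⟩
      · exact Or.inl h
    · rw [if_neg hn] at h
      rcases ih (n / 10) (Nat.digitChar (n % 10) :: l) c h with h' | h'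
      · rcases List.mem_cons.mp h' with h' | h'
        · exact Or.inr ⟨n % 10, Nat.mod_lt _ (by norm_num), h'⟩
        · exact Or.inl h'
      · exact Or.inr h'

lemma pyIntChar_digitChar (m : Nat) (hm : m < 10) :
    0 ≤ pyIntChar (Nat.digitChar m) ∧ pyIntChar (Nat.digitChar m) ≤ 9 := by
  interval_cases m <;> decide

lemma mem_digits_bound (a : Int) (ha : 0 ≤ a) (c : Char) (hc : c ∈ PySem.Int.toChars a) :
    0 ≤ pyIntChar c ∧ pyIntChar c ≤ 9 := by
  unfold PySem.Int.toChars at hc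
  rw [if_neg (by omega)] at hc
  rcases mem_toDigitsCore _ _ _ _ hc with h | ⟨m, hm, rfl⟩
  · simp at h
  · exact pyIntChar_digitChar m hm

lemma set_update_id (l s : List Int) (h : ∀ x ∈ l, x ∈ s) : PySem.Set.update s l = s := by
  induction l generalizing s with
  | nil => rfl
  | cons x l ih =>
    have hx : x ∈ s := h x (List.mem_cons_self ..)
    have : PySem.Set.add s x = s := by simp [PySem.Set.add, PySem.Set.contains, hx]
    simp only [PySem.Set.update, List.foldl_cons] at *
    rw [this]
    exact ih s (fun y hy => h y (List.mem_cons_of_mem _ hy))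

lemma d0_getD (k : Int) :
    (((PySem.List.pyRange 0 10 1).foldl (fun (d : PySem.Dict Int Int) x => d.insert x 0) PySem.Dict.empty).getD k 0) = 0 := by
  have : ((PySem.List.pyRange 0 10 1).foldl (fun (d : PySem.Dict Int Int) x => d.insert x 0) PySem.Dict.empty)
      = PySem.Dict.mk [(0,0),(1,0),(2,0),(3,0),(4,0),(5,0),(6,0),(7,0),(8,0),(9,0)] := by decide
  rw [this]
  simp only [PySem.Dict.getD, PySem.Dict.get?_mk_cons]
  split_ifs <;> rfl

-- the count-table comparison over keys 0..9 agrees with sorted-multiset comparison for digit lists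
lemma all_count_eq_sorted (la lb : List Int)
    (ha : ∀ x ∈ la, 0 ≤ x ∧ x ≤ 9) (hb : ∀ x ∈ lb, 0 ≤ x ∧ x ≤ 9) :
    ((PySem.List.pyRange 0 10 1).all (fun k => ((la.count k : Int)) == ((lb.count k : Int))))
      = ((PySem.List.sorted la (fun x => x) false) == (PySem.List.sorted lb (fun x => x) false)) := by
  rw [Bool.eq_iff_iff]
  simp only [List.all_eq_true, beq_iff_eq, PySem.List.sorted_id_eq_sorted_id_iff_perm]
  constructor
  · intro h
    rw [List.perm_iff_count]
    intro k
    by_cases hk : k ∈ PySem.List.pyRange 0 10 1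
    · exact_mod_cast h k hk
    · rw [PySem.List.mem_pyRange_one] at hk
      rw [List.count_eq_zero.mpr (fun hm => hk ⟨(ha k hm).1, by have := (ha k hm).2; omega⟩),
          List.count_eq_zero.mpr (fun hm => hk ⟨(hb k hm).1, by have := (hb k hm).2; omega⟩)]
  · intro h k _
    exact_mod_cast h.count_eq k

-- ===== VERDICT (by name: the statement is the Claim_ definition above) =====
theorem compare_digit_counts_spec : Claim_equal_compare_digit_counts := by
  intro a b _ hpre
  unfold Spec_compare_digit_counts
  simp only [compare_digit_counts, compare_digit_counts_alt]
  have ha := fun c hc => mem_digits_bound a hpre.1 c hc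
  have hb := fun c hc => mem_digits_bound b hpre.2 c hc
  rw [← List.foldl_map (f := pyIntChar) (g := fun (d : PySem.Dict Int Int) x => d.modify x 0 (· + 1)) (l := PySem.Int.toChars a),
      ← List.foldl_map (f := pyIntChar) (g := fun (d : PySem.Dict Int Int) x => d.modify x 0 (· + 1)) (l := PySem.Int.toChars b)]
  have ha' : ∀ x ∈ (PySem.Int.toChars a).map pyIntChar, 0 ≤ x ∧ x ≤ 9 := by
    intro x hx; rcases List.mem_map.mp hx with ⟨c, hc, rfl⟩; exact ha c hc
  have hb' : ∀ x ∈ (PySem.Int.toChars b).map pyIntChar, 0 ≤ x ∧ x ≤ 9 := by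
    intro x hx; rcases List.mem_map.mp hx with ⟨c, hc, rfl⟩; exact hb c hc
  rw [PySem.Dict.keys_foldl_modify]
  have hk0 : (((PySem.List.pyRange 0 10 1).foldl (fun (d : PySem.Dict Int Int) x => d.insert x 0) PySem.Dict.empty)).keys
      = PySem.List.pyRange 0 10 1 := by decide
  rw [hk0, set_update_id _ _ (fun x hx => by
        rw [PySem.List.mem_pyRange_one]
        have := ha' x hx; omega)]
  rw [← all_count_eq_sorted _ _ ha' hb']
  congr 1
  funext k
  rw [PySem.Dict.getD_foldl_modify_add_one, PySem.Dict.getD_foldl_modify_add_one, d0_getD,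
      zero_add, zero_add]
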